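-- pv_equiv track=rewrite | github.com/jacklxc/FigureSpanDetection | util.py | makeCandidateLookup
-- ===== SOURCE A (Python) =====
-- def makeCandidateLookup(all_candidates):
--     all_indices = {}
--     index = 0
--     for candidates in all_candidates:
--         for candidate in candidates:
--             if candidate not in all_indices:
--                 all_indices[candidate] = index
--                 index += 1
--     return all_indices
-- ===== SOURCE B (Python) =====
-- def makeCandidateLookup(all_candidates):
--     flat = [candidate for candidates in all_candidates for candidate in candidates]
--     # overwrite scanning right-to-left: each key ends up with its FIRST occurrence position
--     first = {}
--     for i, candidate in reversed(list(enumerate(flat))):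
--         first[candidate] = i
--     # sorting the keys by first-occurrence position recovers first-seen order
--     order = sorted(first, key=first.get)
--     return {candidate: i for i, candidate in enumerate(order)}
-- ===== Notes on version B (the rewrite author's own statement) =====
-- stated objective: alternative
-- what changed: Replaces A's fused pass (membership guard + running counter) by a sort-based algorithm: one reverse overwrite pass records each candidate's first-occurrence position, then the keys are sorted by that position and enumerated.
import Mathlib
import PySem

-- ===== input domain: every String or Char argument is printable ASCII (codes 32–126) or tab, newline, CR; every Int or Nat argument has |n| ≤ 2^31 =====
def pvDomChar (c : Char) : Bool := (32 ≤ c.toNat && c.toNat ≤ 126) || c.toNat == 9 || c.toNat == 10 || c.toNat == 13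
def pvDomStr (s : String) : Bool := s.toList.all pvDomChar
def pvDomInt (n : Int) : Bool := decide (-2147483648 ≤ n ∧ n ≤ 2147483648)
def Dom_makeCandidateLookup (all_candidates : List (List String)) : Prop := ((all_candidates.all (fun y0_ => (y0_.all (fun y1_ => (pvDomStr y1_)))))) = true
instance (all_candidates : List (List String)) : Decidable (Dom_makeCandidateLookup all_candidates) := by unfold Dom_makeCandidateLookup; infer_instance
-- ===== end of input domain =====

-- B replaces A's fused single pass (inline membership guard + running counter) by a sort-based
-- algorithm: a reverse overwrite pass records first-occurrence positions, then the keys are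
-- sorted by that position and enumerated; proved to return the same dict.


-- ===== PORT A =====
def makeCandidateLookup (all_candidates : List (List String)) : List (String × Int) :=
  let st := all_candidates.foldl
    (fun st candidates =>
      candidates.foldl
        (fun (st : PySem.Dict String Int × Int) candidate =>
          if st.1.contains candidate then st
          else (st.1.insert candidate st.2, st.2 + 1)) st)
    (PySem.Dict.empty, 0)
  st.1.items

-- ===== PORT B =====
-- 'sorted(first, key=first.get)': every key is present in 'first', so first.get c is the stored
-- value; ported as getD with default 0 (exact on this call).
def makeCandidateLookup_alt (all_candidates : List (List String)) : List (String × Int) :=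
  let flat := all_candidates.flatMap (fun candidates => candidates)
  let first := (PySem.List.enumerate flat).reverse.foldl
      (fun (d : PySem.Dict String Int) p => d.insert p.2 p.1) PySem.Dict.empty
  let order := PySem.List.sorted first.keys (fun candidate => first.getD candidate 0)
  ((PySem.List.enumerate order).foldl
      (fun (d : PySem.Dict String Int) p => d.insert p.2 p.1) PySem.Dict.empty).items

-- ===== PRECONDITION & SPEC =====
def Spec_makeCandidateLookup (all_candidates : List (List String)) (out : List (String × Int)) : Prop := out = makeCandidateLookup_alt all_candidates
instance (all_candidates : List (List String)) (out : List (String × Int)) : Decidable (Spec_makeCandidateLookup all_candidates out) := by unfold Spec_makeCandidateLookup; infer_instance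

-- ===== CLAIM (what is proved, stated in full; the proofs are below) =====
def Claim_equal_makeCandidateLookup : Prop := ∀ (all_candidates : List (List String)), Dom_makeCandidateLookup all_candidates → Spec_makeCandidateLookup all_candidates (makeCandidateLookup all_candidates)

-- ===== LEMMAS AND PROOFS =====

-- A's dict after having seen exactly the distinct candidates u (in order): u enumerated from 0
def enumD (u : List String) : PySem.Dict String Int :=
  PySem.Dict.mk ((PySem.List.enumerate u).map (fun p => (p.2, p.1)))

theorem keys_enumD (u : List String) : (enumD u).keys = u := by
  simp [enumD, PySem.Dict.keys, List.map_map, Function.comp_def, PySem.List.map_snd_enumerate]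

theorem contains_enumD (u : List String) (c : String) :
    (enumD u).contains c = decide (c ∈ u) := by
  rw [PySem.Dict.contains_eq_decide_mem_keys, keys_enumD]

theorem enumerate_append_singleton (u : List String) (x : String) (s : Int) :
    PySem.List.enumerate (u ++ [x]) s
      = PySem.List.enumerate u s ++ [(s + u.length, x)] := by
  induction u generalizing s with
  | nil => simp [PySem.List.enumerate_cons, PySem.List.enumerate_nil]
  | cons y t ih =>
      simp [PySem.List.enumerate_cons, ih]
      ring_nf

theorem insert_enumD (u : List String) (x : String) (hx : x ∉ u) :
    (enumD u).insert x (u.length : Int) = enumD (u ++ [x]) := by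
  have hc : (enumD u).contains x = false := by
    rw [contains_enumD]; simp [hx]
  apply PySem.Dict.ext
  rw [PySem.Dict.items_insert_of_not_contains (enumD u) ((u.length : Int)) hc]
  simp [enumD, enumerate_append_singleton]

-- A's flattened-loop invariant: the fold from state (enumD u, |u|) tracks the running dedup
theorem loopA (xs u : List String) :
    xs.foldl
        (fun (st : PySem.Dict String Int × Int) candidate =>
          if st.1.contains candidate then st
          else (st.1.insert candidate st.2, st.2 + 1))
        (enumD u, (u.length : Int))
      = (enumD (PySem.Set.update u xs), ((PySem.Set.update u xs).length : Int)) := by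
  induction xs generalizing u with
  | nil => simp [PySem.Set.update]
  | cons x t ih =>
      rw [List.foldl_cons, PySem.Set.update_cons]
      by_cases hx : x ∈ u
      · rw [PySem.Set.add_of_mem hx]
        simpa [contains_enumD, hx] using ih u
      · rw [PySem.Set.add_of_not_mem hx]
        have := ih (u ++ [x])
        simpa [contains_enumD, hx, insert_enumD u x hx, List.length_append] using this

theorem foldl_flatten_step (ls : List (List String))
    (f : PySem.Dict String Int × Int → String → PySem.Dict String Int × Int)
    (init : PySem.Dict String Int × Int) :
    ls.foldl (fun st candidates => candidates.foldl f st) init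
      = (ls.flatMap (fun candidates => candidates)).foldl f init := by
  induction ls generalizing init with
  | nil => rfl
  | cons hd tl ih => simp [List.foldl_cons, ih]

-- the reverse overwrite pass: get? is the first-occurrence index (offset by the start)
theorem get?_revFold (flat : List String) (s : Int) (c : String) :
    ((PySem.List.enumerate flat s).foldr
        (fun (p : Int × String) (d : PySem.Dict String Int) => d.insert p.2 p.1)
        PySem.Dict.empty).get? c
      = (PySem.List.index? flat c).map (fun n => s + (n : Int)) := by
  induction flat generalizing s with
  | nil => simp [PySem.List.enumerate_nil, PySem.Dict.get?_empty, PySem.List.index?_eq_idxOf?]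
  | cons x t ih =>
      rw [PySem.List.enumerate_cons, List.foldr_cons]
      by_cases hc : c = x
      · subst hc
        rw [PySem.Dict.get?_insert_self, PySem.List.index?_cons_self]
        simp
      · rw [PySem.Dict.get?_insert_of_ne _ _ hc, ih,
            PySem.List.index?_cons_of_ne _ (Ne.symm hc)]
        cases PySem.List.index? t c with
        | none => rfl
        | some n => simp; ring

theorem keys_revFold (flat : List String) :
    ((PySem.List.enumerate flat).reverse.foldl
        (fun (d : PySem.Dict String Int) p => d.insert p.2 p.1) PySem.Dict.empty).keys
      = PySem.Set.ofList flat.reverse := by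
  rw [PySem.Dict.keys_foldl_insert_key]
  have : ((PySem.List.enumerate flat).reverse.map (fun p : Int × String => p.2))
      = flat.reverse := by
    rw [List.map_reverse, PySem.List.map_snd_enumerate]
  rw [PySem.Dict.keys_empty, this, PySem.Set.update_nil_left]

-- first-occurrence indices are strictly increasing along the ordered dedup
theorem pairwise_idx (flat : List String) :
    (PySem.Set.ofList flat).Pairwise
      (fun a b => (PySem.List.index? flat a).getD 0 < (PySem.List.index? flat b).getD 0) := by
  induction flat with
  | nil => simp [PySem.Set.ofList]
  | cons x t ih =>
      rw [PySem.Set.ofList_cons]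
      constructor
      · intro b hb
        have hbx : b ≠ x := ((PySem.Set.mem_discard _ _ _).1 hb).2
        have hbt : b ∈ t :=
          (PySem.Set.mem_ofList _ _).1 ((PySem.Set.mem_discard _ _ _).1 hb).1
        rw [PySem.List.index?_cons_self, PySem.List.index?_cons_of_ne _ (Ne.symm hbx)]
        have hbs : (PySem.List.index? t b).isSome := (PySem.List.index?_isSome_iff _ _).2 hbt
        cases hsome : PySem.List.index? t b with
        | none => rw [hsome] at hbs; simp at hbs
        | some n => simp
      · have hsub : (PySem.Set.discard (PySem.Set.ofList t) x).Sublist (PySem.Set.ofList t) := by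
          simp [PySem.Set.discard]
        refine ((ih.sublist hsub).imp_of_mem ?_)
        intro a b ha hb hlt
        have hax : a ≠ x := ((PySem.Set.mem_discard _ _ _).1 ha).2
        have hbx : b ≠ x := ((PySem.Set.mem_discard _ _ _).1 hb).2
        have hat : a ∈ t := (PySem.Set.mem_ofList _ _).1 ((PySem.Set.mem_discard _ _ _).1 ha).1
        have hbt : b ∈ t := (PySem.Set.mem_ofList _ _).1 ((PySem.Set.mem_discard _ _ _).1 hb).1
        rw [PySem.List.index?_cons_of_ne _ (Ne.symm hax),
            PySem.List.index?_cons_of_ne _ (Ne.symm hbx)]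
        have ha' : (PySem.List.index? t a).isSome := (PySem.List.index?_isSome_iff _ _).2 hat
        have hb' : (PySem.List.index? t b).isSome := (PySem.List.index?_isSome_iff _ _).2 hbt
        cases hsa : PySem.List.index? t a with
        | none => rw [hsa] at ha'; simp at ha'
        | some na =>
          cases hsb : PySem.List.index? t b with
          | none => rw [hsb] at hb'; simp at hb'
          | some nb =>
            rw [hsa, hsb] at hlt
            simpa using Nat.succ_lt_succ (by simpa using hlt)

-- the sort by first-occurrence position recovers the ordered dedup
theorem order_eq_dedup (flat : List String)
    (first : PySem.Dict String Int)
    (hfirst : first = (PySem.List.enumerate flat).reverse.foldl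
        (fun (d : PySem.Dict String Int) p => d.insert p.2 p.1) PySem.Dict.empty) :
    PySem.List.sorted first.keys (fun candidate => first.getD candidate 0)
      = PySem.List.dedup flat := by
  have hget : ∀ c, first.get? c
      = (PySem.List.index? flat c).map (fun n => ((n : Int))) := by
    intro c
    rw [hfirst, List.foldl_reverse]
    simpa using get?_revFold flat 0 c
  have hkeys : first.keys = PySem.Set.ofList flat.reverse := by
    rw [hfirst]; exact keys_revFold flat
  have hgetD : ∀ c ∈ flat, first.getD c 0 = (((PySem.List.index? flat c).getD 0 : Nat) : Int) := by
    intro c hc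
    have hsome : (PySem.List.index? flat c).isSome := (PySem.List.index?_isSome_iff _ _).2 hc
    cases hs : PySem.List.index? flat c with
    | none => rw [hs] at hsome; simp at hsome
    | some n =>
        have hgc := hget c
        rw [hs] at hgc
        show (first.get? c).getD 0 = _
        rw [hgc]
        simp
  apply PySem.List.sorted_eq_of_perm_of_pairwise_lt
  · -- dedup flat is a permutation of first.keys
    rw [hkeys]
    apply (List.perm_ext_iff_of_nodup (PySem.Set.nodup_ofList flat)
      (PySem.Set.nodup_ofList flat.reverse)).2
    intro a
    simp [PySem.Set.mem_ofList]
  · -- strictly increasing key along dedup flat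
    refine ((pairwise_idx flat).imp_of_mem ?_)
    intro a b ha hb hlt
    have ha' : a ∈ flat := (PySem.Set.mem_ofList _ _).1 ha
    have hb' : b ∈ flat := (PySem.Set.mem_ofList _ _).1 hb
    rw [hgetD a ha', hgetD b hb']
    exact_mod_cast hlt

-- building the result dict over the fresh distinct keys of the dedup
theorem items_build (u : List String) (h : u.Nodup) :
    ((PySem.List.enumerate u).foldl
        (fun (d : PySem.Dict String Int) p => d.insert p.2 p.1) PySem.Dict.empty).items
      = (PySem.List.enumerate u).map (fun p => (p.2, p.1)) := by
  have hnd : ((PySem.List.enumerate u).map (fun p : Int × String => p.2)).Nodup := by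
    rw [PySem.List.map_snd_enumerate]; exact h
  have hfresh : ∀ p ∈ PySem.List.enumerate u,
      (PySem.Dict.empty : PySem.Dict String Int).contains
        ((fun p : Int × String => p.2) p) = false := by
    intro p _; exact PySem.Dict.contains_empty _
  simpa using PySem.Dict.items_foldl_insert_fresh (PySem.List.enumerate u)
      (fun p : Int × String => p.2) (fun p : Int × String => p.1)
      (PySem.Dict.empty : PySem.Dict String Int) hfresh hnd

theorem alt_items (all_candidates : List (List String)) :
    makeCandidateLookup_alt all_candidates
      = (enumD (PySem.List.dedup
          (all_candidates.flatMap (fun candidates => candidates)))).items := by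
  unfold makeCandidateLookup_alt enumD
  dsimp only
  rw [order_eq_dedup _ _ rfl, items_build _ (PySem.List.nodup_dedup _)]

-- ===== VERDICT (by name: the statement is the Claim_ definition above) =====
theorem makeCandidateLookup_spec : Claim_equal_makeCandidateLookup := by
  intro all_candidates _
  unfold Spec_makeCandidateLookup makeCandidateLookup
  rw [foldl_flatten_step, show ((PySem.Dict.empty : PySem.Dict String Int), (0 : Int))
        = (enumD [], (([] : List String).length : Int)) by rfl, loopA]
  rw [alt_items]
  simp [PySem.Set.update_nil_left]
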